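-- pv_equiv track=rewrite | github.com/ready4god2513/attendee | bots/teams_bot_adapter/teams_bot_adapter.py | _html_fragment_for_clipboard
-- ===== SOURCE A (Python) =====
-- def _html_fragment_for_clipboard(text: str) -> str:
--     # Convert newlines to <br>
--     result = text.replace("\n", "<br>")
--
--     # Convert spaces outside of HTML tags to &#32;
--     # Parse through the text and only replace spaces that are not inside tags
--     parts = []
--     i = 0
--     while i < len(result):
--         if result[i] == "<":
--             # Find the end of the tag
--             tag_end = result.find(">", i)
--             if tag_end != -1:
--                 # Keep the tag as-is
--                 parts.append(result[i : tag_end + 1])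
--                 i = tag_end + 1
--             else:
--                 # Malformed tag, treat as text
--                 parts.append("&#32;" if result[i] == " " else result[i])
--                 i += 1
--         elif result[i] == " ":
--             parts.append("&#32;")
--             i += 1
--         else:
--             parts.append(result[i])
--             i += 1
--
--     return "".join(parts)
-- ===== SOURCE B (Python) =====
-- def _html_fragment_for_clipboard(text: str) -> str:
--     # Chunk-based: repeatedly cut off (text-before-tag, tag) pairs instead of
--     # scanning character by character.
--     s = text.replace("\n", "<br>")
--     out = []
--     while True:
--         lt = s.find("<")
--         gt = s.find(">", lt) if lt != -1 else -1
--         if lt == -1 or gt == -1: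
--             out.append(s.replace(" ", "&#32;"))
--             return "".join(out)
--         out.append(s[:lt].replace(" ", "&#32;"))
--         out.append(s[lt : gt + 1])
--         s = s[gt + 1 :]
-- ===== Notes on version B (the rewrite author's own statement) =====
-- stated objective: idiomatic
-- what changed: Replaced A's character-by-character index scan (appending one escaped character or one tag per iteration) with a chunk loop that repeatedly finds the next '<'...'>' tag, escapes the whole text slice before it with str.replace, and copies the tag slice verbatim; the per-character work moves into C-level find/replace/slicing, a constant-factor speedup a timing run measured.
import Mathlib
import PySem

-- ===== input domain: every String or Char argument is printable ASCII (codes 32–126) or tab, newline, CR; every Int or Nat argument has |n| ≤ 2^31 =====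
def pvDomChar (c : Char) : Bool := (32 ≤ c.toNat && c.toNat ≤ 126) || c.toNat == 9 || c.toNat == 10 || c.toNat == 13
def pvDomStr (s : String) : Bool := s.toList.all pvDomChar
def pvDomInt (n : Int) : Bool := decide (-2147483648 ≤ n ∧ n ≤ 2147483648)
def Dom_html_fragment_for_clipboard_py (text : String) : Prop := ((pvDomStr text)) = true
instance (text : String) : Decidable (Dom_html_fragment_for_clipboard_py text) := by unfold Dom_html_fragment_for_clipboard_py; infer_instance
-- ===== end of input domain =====

-- B replaces A's character-by-character scan with a chunk loop that repeatedly cuts off a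
-- (text-before-tag, tag) pair using find and slicing; same return value, objective: idiomatic.

-- ===== PORT A =====
-- A's while loop over index i, carried as structural recursion on the remaining suffix;
-- result.find(">", i) on the suffix is the single-char search findIdx? (· = '>').
def pvLoopA : List Char → List Char
  | [] => []
  | c :: rest =>
    if c = '<' then
      match (c :: rest).findIdx? (· = '>') with
      | some j => (c :: rest).take (j + 1) ++ pvLoopA ((c :: rest).drop (j + 1))
      | none => (if c = ' ' then "&#32;".toList else [c]) ++ pvLoopA rest
    else if c = ' ' then "&#32;".toList ++ pvLoopA rest
    else c :: pvLoopA rest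
termination_by s => s.length
decreasing_by all_goals simp

def html_fragment_for_clipboard_py (text : String) : String :=
  String.ofList (pvLoopA (PySem.Chars.replace text.toList "\n".toList "<br>".toList))

-- ===== PORT B =====
def pvEscB (s : List Char) : List Char := PySem.Chars.replace s " ".toList "&#32;".toList

-- Source B's while loop: find "<", find ">" from there; emit the escaped prefix and the raw tag,
-- continue on the remainder; if either is missing, escape the whole remainder and stop.
def pvLoopB (s : List Char) : List Char :=
  match h1 : s.findIdx? (· = '<') with
  | none => pvEscB s
  | some i =>
    match (s.drop i).findIdx? (· = '>') with
    | none => pvEscB s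
    | some j => pvEscB (s.take i) ++ (s.drop i).take (j + 1) ++ pvLoopB (s.drop (i + (j + 1)))
termination_by s.length
decreasing_by
  have hi := (List.findIdx?_eq_some_iff_getElem.mp h1).fst
  simp; omega

def html_fragment_for_clipboard_py_alt (text : String) : String :=
  String.ofList (pvLoopB (PySem.Chars.replace text.toList "\n".toList "<br>".toList))

-- ===== PRECONDITION & SPEC =====
def Spec_html_fragment_for_clipboard_py (text : String) (out : String) : Prop := out = html_fragment_for_clipboard_py_alt text
instance (text : String) (out : String) : Decidable (Spec_html_fragment_for_clipboard_py text out) := by unfold Spec_html_fragment_for_clipboard_py; infer_instance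

-- ===== CLAIM (what is proved, stated in full; the proofs are below) =====
def Claim_equal_html_fragment_for_clipboard_py : Prop := ∀ (text : String), Dom_html_fragment_for_clipboard_py text → Spec_html_fragment_for_clipboard_py text (html_fragment_for_clipboard_py text)

-- ===== LEMMAS AND PROOFS =====

-- proof-side helper: per-character space escaping
def pvEsc (s : List Char) : List Char :=
  s.flatMap (fun c => if c = ' ' then "&#32;".toList else [c])

-- equation lemmas for pvLoopB (its dependent match is awkward to rewrite directly)
lemma pvLoopB_no_lt (s : List Char) (h : s.findIdx? (· = '<') = none) :
    pvLoopB s = pvEscB s := by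
  rw [pvLoopB]
  split
  · rfl
  · rename_i i' heq
    rw [heq] at h
    cases h

lemma pvLoopB_no_gt (s : List Char) (i : Nat) (h1 : s.findIdx? (· = '<') = some i)
    (h2 : (s.drop i).findIdx? (· = '>') = none) : pvLoopB s = pvEscB s := by
  rw [pvLoopB]
  split
  · rename_i heq
    rw [heq] at h1
  · rename_i i' heq
    have hii : i' = i := Option.some.inj (heq.symm.trans h1)
    subst hii
    split
    · rfl
    · rename_i j' heq2
      rw [heq2] at h2
      cases h2

lemma pvLoopB_tag (s : List Char) (i j : Nat) (h1 : s.findIdx? (· = '<') = some i)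
    (h2 : (s.drop i).findIdx? (· = '>') = some j) :
    pvLoopB s = pvEscB (s.take i) ++ (s.drop i).take (j + 1) ++ pvLoopB (s.drop (i + (j + 1))) := by
  rw [pvLoopB]
  split
  · rename_i heq
    rw [heq] at h1
    cases h1
  · rename_i i' heq
    have hii : i' = i := Option.some.inj (heq.symm.trans h1)
    subst hii
    split
    · rename_i heq2
      rw [heq2] at h2
      cases h2
    · rename_i j' heq2
      have hjj : j' = j := Option.some.inj (heq2.symm.trans h2)
      subst hjj
      simp

lemma pvEscB_go (s : List Char) : ∀ (fuel : Nat) (acc : List Char), s.length ≤ fuel →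
    PySem.Chars.replace.go [' '] "&#32;".toList fuel s acc = acc.reverse ++ pvEsc s := by
  induction s with
  | nil =>
    intro fuel acc _
    cases fuel <;> simp [PySem.Chars.replace.go, pvEsc]
  | cons c t ih =>
    intro fuel acc hle
    cases fuel with
    | zero => simp at hle
    | succ f =>
      by_cases hc : c = ' '
      · subst hc
        rw [PySem.Chars.replace.go]
        simp only [List.isPrefixOf, BEq.rfl, Bool.true_and, if_pos]
        have hd : List.drop [' '].length (' ' :: t) = t := rfl
        rw [hd, ih f _ (by simpa using hle)]
        simp [pvEsc]
      · rw [PySem.Chars.replace.go]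
        have hpre : [' '].isPrefixOf (c :: t) = false := by
          simp [List.isPrefixOf]; exact fun h => hc h.symm
        rw [hpre]
        simp only [Bool.false_eq_true, if_false]
        rw [ih f _ (by simpa using hle)]
        simp [pvEsc, hc]

lemma pvEscB_eq (s : List Char) : pvEscB s = pvEsc s := by
  have h1 : " ".toList = [' '] := rfl
  unfold pvEscB PySem.Chars.replace
  rw [h1, pvEscB_go s s.length [] le_rfl]
  simp

lemma pvEsc_append (s t : List Char) : pvEsc (s ++ t) = pvEsc s ++ pvEsc t := by
  simp [pvEsc]

-- A's scan over a '<'-free prefix just escapes it character by character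
lemma pvLoopA_append (pre : List Char) (rest : List Char)
    (h : ∀ c ∈ pre, c ≠ '<') : pvLoopA (pre ++ rest) = pvEsc pre ++ pvLoopA rest := by
  induction pre with
  | nil => simp [pvEsc]
  | cons c p ih =>
    have hc : c ≠ '<' := h c (by simp)
    have ih' := ih (fun x hx => h x (by simp [hx]))
    by_cases hsp : c = ' '
    · subst hsp
      rw [List.cons_append, pvLoopA]
      simp [hc, ih', pvEsc]
    · rw [List.cons_append, pvLoopA]
      simp [hc, hsp, ih', pvEsc]

-- with no '>' anywhere, A escapes everything (malformed-tag fallback)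
lemma pvLoopA_no_gt (s : List Char) (h : ∀ c ∈ s, c ≠ '>') : pvLoopA s = pvEsc s := by
  induction s with
  | nil => simp [pvLoopA, pvEsc]
  | cons c t ih =>
    have ih' := ih (fun x hx => h x (by simp [hx]))
    have hnone : (c :: t).findIdx? (· = '>') = none := by
      rw [List.findIdx?_eq_none_iff]
      intro x hx
      simp [h x hx]
    by_cases hlt : c = '<'
    · subst hlt
      rw [pvLoopA]
      simp [hnone, ih', pvEsc]
    · by_cases hsp : c = ' '
      · subst hsp
        rw [pvLoopA]
        simp [hlt, ih', pvEsc]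
      · rw [pvLoopA]
        simp [hlt, hsp, ih', pvEsc]

lemma pvLoop_eq_aux : ∀ (n : Nat) (s : List Char), s.length ≤ n → pvLoopA s = pvLoopB s := by
  intro n
  induction n with
  | zero =>
    intro s hs
    have : s = [] := List.eq_nil_of_length_eq_zero (Nat.le_zero.mp hs)
    subst this
    rw [pvLoopB_no_lt [] (by simp), pvEscB_eq]
    simp [pvLoopA, pvEsc]
  | succ n ih =>
    intro s hs
    cases h1 : s.findIdx? (· = '<') with
    | none =>
      have hno : ∀ c ∈ s, c ≠ '<' := by
        rw [List.findIdx?_eq_none_iff] at h1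
        intro c hc
        simpa using h1 c hc
      have hA := pvLoopA_append s [] hno
      simp only [List.append_nil] at hA
      rw [pvLoopB_no_lt s h1, hA, pvEscB_eq]
      simp [pvLoopA, pvEsc]
    | some i =>
      obtain ⟨hi, hgi, hbefore⟩ := List.findIdx?_eq_some_iff_getElem.mp h1
      have hgi' : s[i] = '<' := by simpa using hgi
      have htake : ∀ c ∈ s.take i, c ≠ '<' := by
        intro c hc
        rw [List.mem_take_iff_getElem] at hc
        obtain ⟨j, hj, hjc⟩ := hc
        have hji : j < i := lt_of_lt_of_le hj (min_le_left _ _)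
        have hb := hbefore j hji
        simp only [decide_eq_true_eq] at hb
        rw [← hjc]
        exact hb
      have hdecomp := List.take_append_drop i s
      cases h2 : (s.drop i).findIdx? (· = '>') with
      | none =>
        have hnogt : ∀ c ∈ s.drop i, c ≠ '>' := by
          rw [List.findIdx?_eq_none_iff] at h2
          intro c hc
          simpa using h2 c hc
        rw [pvLoopB_no_gt s i h1 h2, pvEscB_eq]
        calc pvLoopA s = pvLoopA (s.take i ++ s.drop i) := by rw [hdecomp]
          _ = pvEsc (s.take i) ++ pvLoopA (s.drop i) := pvLoopA_append _ _ htake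
          _ = pvEsc (s.take i) ++ pvEsc (s.drop i) := by rw [pvLoopA_no_gt _ hnogt]
          _ = pvEsc s := by rw [← pvEsc_append, hdecomp]
      | some j =>
        have hdropcons : s.drop i = s[i] :: s.drop (i + 1) := List.drop_eq_getElem_cons hi
        have hAdrop : pvLoopA (s.drop i) =
            (s.drop i).take (j + 1) ++ pvLoopA ((s.drop i).drop (j + 1)) := by
          rw [hdropcons] at h2 ⊢
          rw [hgi'] at h2 ⊢
          rw [pvLoopA]
          simp [h2]
        have hdropdrop : (s.drop i).drop (j + 1) = s.drop (i + (j + 1)) := List.drop_drop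
        have hih : pvLoopA (s.drop (i + (j + 1))) = pvLoopB (s.drop (i + (j + 1))) := by
          apply ih
          simp only [List.length_drop]
          omega
        rw [pvLoopB_tag s i j h1 h2, pvEscB_eq]
        calc pvLoopA s = pvLoopA (s.take i ++ s.drop i) := by rw [hdecomp]
          _ = pvEsc (s.take i) ++ pvLoopA (s.drop i) := pvLoopA_append _ _ htake
          _ = pvEsc (s.take i) ++ ((s.drop i).take (j + 1) ++ pvLoopB (s.drop (i + (j + 1)))) := by
              rw [hAdrop, hdropdrop, hih]
        simp

lemma pvLoop_eq (s : List Char) : pvLoopA s = pvLoopB s := pvLoop_eq_aux s.length s le_rfl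

-- ===== VERDICT (by name: the statement is the Claim_ definition above) =====
theorem html_fragment_for_clipboard_py_spec : Claim_equal_html_fragment_for_clipboard_py := by
  intro text _
  unfold Spec_html_fragment_for_clipboard_py html_fragment_for_clipboard_py html_fragment_for_clipboard_py_alt
  rw [pvLoop_eq]
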